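-- pv_equiv track=rewrite | github.com/sha-env/cipher | hill_cipher_gui.py | inverse_matrix_mod26
-- ===== SOURCE A (Python) =====
-- from math import gcd
--
-- def determinant_3x3(mat):
--     a,b,c = mat[0]
--     d,e,f = mat[1]
--     g,h,i = mat[2]
--     det = a*(e*i - f*h) - b*(d*i - f*g) + c*(d*h - e*g)
--     return det
--
-- def modinv(a, m):
--     """modular inverse of a modulo m using extended gcd. Return None jika tidak ada."""
--     a = a % m
--     if gcd(a, m) != 1:
--         return None
--     # extended euclid
--     def egcd(a,b):
--         if b==0:
--             return (1,0,a)
--         x,y,g = egcd(b, a % b)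
--         return (y, x - (a // b) * y, g)
--     x, y, g = egcd(a, m)
--     return x % m
--
-- def cofactor_matrix_3x3(mat):
--     # compute matrix of cofactors (not transposed)
--     a,b,c = mat[0]
--     d,e,f = mat[1]
--     g,h,i = mat[2]
--     C = [
--         [ (e*i - f*h), -(d*i - f*g),  (d*h - e*g)],
--         [-(b*i - c*h),  (a*i - c*g), -(a*h - b*g)],
--         [ (b*f - c*e), -(a*f - c*d),  (a*e - b*d)]
--     ]
--     return C
--
-- def adjugate_3x3(mat):
--     # adjugate = transpose of cofactor matrix
--     C = cofactor_matrix_3x3(mat)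
--     # transpose
--     return [[C[j][i] for j in range(3)] for i in range(3)]
--
-- def inverse_matrix_mod26(mat):
--     det = determinant_3x3(mat)
--     det_mod = det % 26
--     inv_det = modinv(det_mod, 26)
--     if inv_det is None:
--         return None, det, det_mod, None  # tidak invertible
--     adj = adjugate_3x3(mat)
--     inv = [[ (inv_det * adj[i][j]) % 26 for j in range(3)] for i in range(3)]
--     return inv, det, det_mod, inv_det
-- ===== SOURCE B (Python) =====
-- def modinv(a, m):
--     """modular inverse of a modulo m by direct search over residues; None if it does not exist."""
--     a = a % m
--     for k in range(m):
--         if (a * k) % m == 1: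
--             return k
--     return None
--
-- def inverse_matrix_mod26(mat):
--     a, b, c = mat[0]
--     d, e, f = mat[1]
--     g, h, i = mat[2]
--     det = a*(e*i - f*h) - b*(d*i - f*g) + c*(d*h - e*g)
--     det_mod = det % 26
--     inv_det = modinv(det_mod, 26)
--     if inv_det is None:
--         return None, det, det_mod, None
--     # adjugate written out directly (transpose of the cofactor matrix)
--     adj = [
--         [  e*i - f*h, -(b*i - c*h),   b*f - c*e],
--         [-(d*i - f*g),  a*i - c*g,  -(a*f - c*d)],
--         [  d*h - e*g, -(a*h - b*g),   a*e - b*d],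
--     ]
--     inv = [[(inv_det * x) % 26 for x in row] for row in adj]
--     return inv, det, det_mod, inv_det
-- ===== Notes on version B (the rewrite author's own statement) =====
-- stated objective: simpler
-- what changed: modinv's recursive extended-Euclid is replaced by a direct linear scan of residues 0..m-1 for the first k with (a*k)%m==1, and the adjugate is written out directly instead of building the cofactor matrix and transposing it with nested comprehensions; the nine entries are destructured once at the top.
import Mathlib
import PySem

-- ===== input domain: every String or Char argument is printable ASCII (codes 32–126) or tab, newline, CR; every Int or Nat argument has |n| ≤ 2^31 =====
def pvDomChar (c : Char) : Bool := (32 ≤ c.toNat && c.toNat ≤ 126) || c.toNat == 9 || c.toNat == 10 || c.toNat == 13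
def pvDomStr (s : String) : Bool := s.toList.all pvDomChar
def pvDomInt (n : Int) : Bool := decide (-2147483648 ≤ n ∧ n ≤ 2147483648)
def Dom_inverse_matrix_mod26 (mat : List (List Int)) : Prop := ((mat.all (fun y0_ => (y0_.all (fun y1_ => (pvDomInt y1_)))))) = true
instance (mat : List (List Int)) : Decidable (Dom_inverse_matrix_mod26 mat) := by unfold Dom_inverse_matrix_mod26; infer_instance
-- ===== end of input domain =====

-- B replaces the recursive extended-Euclid modular inverse with a direct linear scan of
-- residues mod 26 and writes the adjugate out directly instead of cofactor-then-transpose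
-- (objective: simpler; same cost at the fixed modulus 26).


-- ===== PORT A =====
-- determinant_3x3: unpacks rows 0..2 into nine entries (Python raises on wrong shape;
-- the fallback 0 is outside Pre_).
def determinant_3x3A (mat : List (List Int)) : Int :=
  match mat with
  | [a,b,c] :: [d,e,f] :: [g,h,i] :: _ =>
      a*(e*i - f*h) - b*(d*i - f*g) + c*(d*h - e*g)
  | _ => 0

-- egcd: A's inner recursive extended Euclid, with fuel |b|+1 purely for totality
-- (the Python mod strictly shrinks |b| each step, so the fuel is never exhausted
-- on the calls A makes).
def egcdA : Nat → Int → Int → Int × Int × Int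
  | 0, a, _ => (1, 0, a)
  | fuel+1, a, b =>
      if b = 0 then (1, 0, a)
      else
        let (x, y, g) := egcdA fuel b (PySem.Int.mod a b)
        (y, x - (PySem.Int.floordiv a b) * y, g)

-- modinv: a %= m; None if gcd(a,m) != 1; else x % m from extended Euclid.
def modinvA (a m : Int) : Option Int :=
  let a' := PySem.Int.mod a m
  if Int.gcd a' m ≠ 1 then none
  else
    let (x, _, _) := egcdA (m.natAbs + 1) a' m
    some (PySem.Int.mod x m)

-- cofactor_matrix_3x3 (fallback outside Pre_ only)
def cofactor_matrix_3x3A (mat : List (List Int)) : List (List Int) :=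
  match mat with
  | [a,b,c] :: [d,e,f] :: [g,h,i] :: _ =>
      [ [ (e*i - f*h), -(d*i - f*g),  (d*h - e*g)],
        [-(b*i - c*h),  (a*i - c*g), -(a*h - b*g)],
        [ (b*f - c*e), -(a*f - c*d),  (a*e - b*d)] ]
  | _ => []

-- adjugate_3x3: transpose of the cofactor matrix via the nested range-3 comprehension.
def adjugate_3x3A (mat : List (List Int)) : List (List Int) :=
  let C := cofactor_matrix_3x3A mat
  (PySem.List.pyRange 0 3 1).map (fun i =>
    (PySem.List.pyRange 0 3 1).map (fun j =>
      PySem.List.pyGetD (PySem.List.pyGetD C j []) i 0))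

def inverse_matrix_mod26 (mat : List (List Int)) : Option (List (List Int)) × Int × Int × Option Int :=
  let det := determinant_3x3A mat
  let det_mod := PySem.Int.mod det 26
  match modinvA det_mod 26 with
  | none => (none, det, det_mod, none)
  | some inv_det =>
      let adj := adjugate_3x3A mat
      let inv := (PySem.List.pyRange 0 3 1).map (fun i =>
        (PySem.List.pyRange 0 3 1).map (fun j =>
          PySem.Int.mod (inv_det * PySem.List.pyGetD (PySem.List.pyGetD adj i []) j 0) 26))
      (some inv, det, det_mod, some inv_det)

-- ===== PORT B =====
-- modinv by direct scan: first k in range(m) with (a*k) % m == 1, else None.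
def modinvB (a m : Int) : Option Int :=
  let a' := PySem.Int.mod a m
  (PySem.List.pyRange 0 m 1).find? (fun k => PySem.Int.mod (a' * k) m == 1)

def inverse_matrix_mod26_alt (mat : List (List Int)) : Option (List (List Int)) × Int × Int × Option Int :=
  match mat with
  | [a,b,c] :: [d,e,f] :: [g,h,i] :: _ =>
      let det := a*(e*i - f*h) - b*(d*i - f*g) + c*(d*h - e*g)
      let det_mod := PySem.Int.mod det 26
      match modinvB det_mod 26 with
      | none => (none, det, det_mod, none)
      | some inv_det =>
          let adj := [ [  e*i - f*h, -(b*i - c*h),   b*f - c*e],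
                       [-(d*i - f*g),  a*i - c*g,  -(a*f - c*d)],
                       [  d*h - e*g, -(a*h - b*g),   a*e - b*d] ]
          (some (adj.map (fun row => row.map (fun x => PySem.Int.mod (inv_det * x) 26))),
           det, det_mod, some inv_det)
  | _ => (none, 0, 0, none)

-- ===== PRECONDITION & SPEC =====
-- Pre_ excludes exactly the malformed shapes on which Python's tuple unpacking raises:
-- fewer than 3 rows, or one of the first three rows not of length 3.
def Pre_inverse_matrix_mod26 (mat : List (List Int)) : Prop :=
  3 ≤ mat.length ∧ ((mat.take 3).all (fun r => r.length == 3)) = true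
instance (mat : List (List Int)) : Decidable (Pre_inverse_matrix_mod26 mat) := by
  unfold Pre_inverse_matrix_mod26; infer_instance

def pvWitness_inverse_matrix_mod26 : List (List Int) := [[1,2,3],[0,1,4],[5,6,0]]

def Spec_inverse_matrix_mod26 (mat : List (List Int)) (out : Option (List (List Int)) × Int × Int × Option Int) : Prop := out = inverse_matrix_mod26_alt mat
instance (mat : List (List Int)) (out : Option (List (List Int)) × Int × Int × Option Int) : Decidable (Spec_inverse_matrix_mod26 mat out) := by unfold Spec_inverse_matrix_mod26; infer_instance

-- ===== CLAIM (what is proved, stated in full; the proofs are below) =====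
def Claim_equal_inverse_matrix_mod26 : Prop := ∀ (mat : List (List Int)), Dom_inverse_matrix_mod26 mat → Pre_inverse_matrix_mod26 mat → Spec_inverse_matrix_mod26 mat (inverse_matrix_mod26 mat)

-- ===== LEMMAS AND PROOFS =====


-- The two modinv helpers agree at modulus 26 on every residue 0 ≤ d < 26.
lemma modinv_agree (d : Int) (h0 : 0 ≤ d) (h1 : d < 26) : modinvA d 26 = modinvB d 26 := by
  interval_cases d <;> decide

-- ===== VERDICT =====
theorem inverse_matrix_mod26_spec : Claim_equal_inverse_matrix_mod26 := by
  intro mat _ hpre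
  obtain ⟨hlen, hrows⟩ := hpre
  match mat with
  | r0 :: r1 :: r2 :: rest =>
    simp [List.all_cons] at hrows
    obtain ⟨x0,x1,x2,h0⟩ := List.length_eq_three.mp hrows.1
    obtain ⟨y0,y1,y2,h1⟩ := List.length_eq_three.mp hrows.2.1
    obtain ⟨z0,z1,z2,h2⟩ := List.length_eq_three.mp hrows.2.2
    subst h0 h1 h2
    show inverse_matrix_mod26 _ = inverse_matrix_mod26_alt _
    unfold inverse_matrix_mod26 inverse_matrix_mod26_alt determinant_3x3A
    dsimp only
    rw [modinv_agree _ (PySem.Int.mod_nonneg _ (by norm_num)) (PySem.Int.mod_lt _ (by norm_num))]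
    cases hmv : modinvB (PySem.Int.mod (x0*(y1*z2 - y2*z1) - x1*(y0*z2 - y2*z0) + x2*(y0*z1 - y1*z0)) 26) 26 with
    | none => rfl
    | some v =>
      simp [adjugate_3x3A, cofactor_matrix_3x3A, PySem.List.pyRange_one, List.range_succ,
            PySem.List.pyGetD, PySem.List.pyGet?, PySem.List.pyIdx?]
  | [] => simp at hlen
  | [_] => simp at hlen
  | [_, _] => simp at hlen
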